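-- pv_equiv track=rewrite | github.com/yerimeeei/Rosalind | A10-Q32.py | dfs
-- ===== SOURCE A (Python) =====
-- def dfs(graph, start, target, visited):
--     """Return distance from start to target using DFS."""
--     if start == target:
--         return 0
--     visited.add(start)
--     for nxt, w in graph.get(start, []):
--         if nxt not in visited:
--             dist = dfs(graph, nxt, target, visited)
--             if dist is not None:
--                 return w + dist
--     return None
-- ===== SOURCE B (Python) =====
-- def dfs(graph, start, target, visited):
--     """Return distance from start to target: iterative DFS with an explicit
--     stack of (edge-weight, neighbor-iterator) frames instead of recursion.
--     Mutates `visited` exactly like the recursive version."""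
--     if start == target:
--         return 0
--     visited.add(start)
--     stack = [(0, iter(graph.get(start, [])))]
--     while stack:
--         for nxt, w in stack[-1][1]:
--             if nxt in visited:
--                 continue
--             if nxt == target:
--                 return sum(f[0] for f in stack) + w
--             visited.add(nxt)
--             stack.append((w, iter(graph.get(nxt, []))))
--             break
--         else:
--             stack.pop()
--     return None
-- ===== Notes on version B (the rewrite author's own statement) =====
-- stated objective: alternative
-- what changed: A's recursive DFS (with the neighbour loop and early return inside the recursion) is re-decomposed as an iterative DFS driven by an explicit stack of (edge-weight, neighbour-iterator) frames and a running path-weight sum, returning on the first unvisited neighbour equal to the target.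
import Mathlib
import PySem

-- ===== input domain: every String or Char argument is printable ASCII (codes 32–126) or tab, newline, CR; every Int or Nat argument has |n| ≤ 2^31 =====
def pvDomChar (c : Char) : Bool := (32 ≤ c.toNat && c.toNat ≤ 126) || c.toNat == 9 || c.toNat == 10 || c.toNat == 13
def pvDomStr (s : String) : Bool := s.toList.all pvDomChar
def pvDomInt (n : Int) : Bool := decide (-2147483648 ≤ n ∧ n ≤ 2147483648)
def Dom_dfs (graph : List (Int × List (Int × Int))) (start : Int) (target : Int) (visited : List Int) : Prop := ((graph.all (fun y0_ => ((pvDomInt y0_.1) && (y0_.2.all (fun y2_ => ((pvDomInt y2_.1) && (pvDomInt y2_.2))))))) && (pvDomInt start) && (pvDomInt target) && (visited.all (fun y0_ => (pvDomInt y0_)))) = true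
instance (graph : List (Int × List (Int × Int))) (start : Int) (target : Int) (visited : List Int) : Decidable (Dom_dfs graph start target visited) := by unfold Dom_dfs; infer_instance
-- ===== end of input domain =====

-- B replaces A's recursion by an iterative DFS over an explicit stack of (edge-weight, remaining-neighbors)
-- frames (objective: alternative decomposition, same cost). Both Pythons mutate `visited` identically;
-- the equivalence proved here is about the RETURN value (the ports thread visited explicitly).

-- ===== PORT A =====
-- measure helpers (termination only)
def pvKeysLeft (graph : List (Int × List (Int × Int))) (v : List Int) : Nat :=
  ((PySem.List.dedup (graph.map Prod.fst)).filter (fun k => !(v.contains k))).length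

theorem pvSubset_add (v : List Int) (n : Int) : v ⊆ PySem.Set.add v n := by
  intro x hx; rw [PySem.Set.mem_add]; exact Or.inl hx

theorem pvFilter_mono (l : List Int) (v v' : List Int) (hs : v ⊆ v') :
    (l.filter (fun k => !(v'.contains k))).length ≤ (l.filter (fun k => !(v.contains k))).length := by
  induction l with
  | nil => simp
  | cons a l ih =>
    by_cases ha' : a ∈ v'
    · by_cases ha : a ∈ v
      · simp only [List.contains_eq_mem, List.filter_cons] at ih ⊢; simp [ha, ha']; omega
      · simp only [List.contains_eq_mem, List.filter_cons] at ih ⊢; simp [ha, ha']; omega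
    · have ha : a ∉ v := fun h => ha' (hs h)
      simp only [List.contains_eq_mem, List.filter_cons] at ih ⊢; simp [ha, ha']; omega

theorem pvKeysLeft_mono (graph : List (Int × List (Int × Int))) (v v' : List Int) (hs : v ⊆ v') :
    pvKeysLeft graph v' ≤ pvKeysLeft graph v :=
  pvFilter_mono _ v v' hs

theorem pvFilter_add_eq (v : List Int) (n : Int) (l : List Int) :
    l.filter (fun k => !(List.contains (PySem.Set.add v n) k))
      = (l.filter (fun k => !(v.contains k))).filter (fun k => !(k == n)) := by
  rw [List.filter_filter]
  apply List.filter_congr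
  intro k _
  by_cases hkn : k = n <;> by_cases hkv : k ∈ v <;>
    simp [PySem.Set.mem_add, hkn, hkv]

theorem pvKeysLeft_lt_add (graph : List (Int × List (Int × Int))) (v : List Int) (n : Int)
    (hk : n ∈ graph.map Prod.fst) (hv : n ∉ v) :
    pvKeysLeft graph (PySem.Set.add v n) < pvKeysLeft graph v := by
  unfold pvKeysLeft
  rw [pvFilter_add_eq v n (PySem.List.dedup (graph.map Prod.fst))]
  have hmem : n ∈ (PySem.List.dedup (graph.map Prod.fst)).filter (fun k => !(v.contains k)) := by
    simp [List.mem_filter, hk, hv]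
  exact List.length_filter_lt_length_iff_exists.mpr ⟨n, hmem, by simp⟩

theorem pvKeysLeft_add_not_key (graph : List (Int × List (Int × Int))) (v : List Int) (n : Int)
    (hk : n ∉ graph.map Prod.fst) :
    pvKeysLeft graph (PySem.Set.add v n) = pvKeysLeft graph v := by
  unfold pvKeysLeft
  congr 1
  apply List.filter_congr
  intro k hkmem
  have hkn : k ≠ n := by
    intro h; subst h; exact hk (by simpa [PySem.List.mem_dedup] using hkmem)
  by_cases hkv : k ∈ v <;> simp [PySem.Set.mem_add, hkv, hkn]

theorem pvGetD_nil_of_not_key (graph : List (Int × List (Int × Int))) (n : Int)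
    (hk : n ∉ graph.map Prod.fst) : (PySem.Dict.mk graph).getD n [] = ([] : List (Int × Int)) := by
  apply PySem.Dict.getD_of_not_contains
  simp only [PySem.Dict.contains_eq_decide_mem_keys, PySem.Dict.keys, decide_eq_false_iff_not]
  intro h
  exact absurd h hk

mutual
/-- port of A's `dfs`: returns (result, visited-after); visited only ever grows, which the result records -/
def dfsA (graph : List (Int × List (Int × Int))) (s t : Int) (v : List Int) :
    {p : Option Int × List Int // v ⊆ p.2} :=
  if s = t then ⟨(some 0, v), List.Subset.refl v⟩
  else
    let r := goA graph ((PySem.Dict.mk graph).getD s []) t (PySem.Set.add v s)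
    ⟨r.val, List.Subset.trans (pvSubset_add v s) r.prop⟩
termination_by (pvKeysLeft graph (PySem.Set.add v s), ((PySem.Dict.mk graph).getD s []).length, 1)
decreasing_by
  exact Prod.Lex.right _ (Prod.Lex.right _ Nat.zero_lt_one)

/-- port of A's `for nxt, w in graph.get(start, []):` loop (threads visited like the shared set) -/
def goA (graph : List (Int × List (Int × Int))) (l : List (Int × Int)) (t : Int) (v : List Int) :
    {p : Option Int × List Int // v ⊆ p.2} :=
  match l with
  | [] => ⟨(none, v), List.Subset.refl v⟩
  | (n, w) :: rest =>
    if _hv : n ∈ v then goA graph rest t v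
    else
      match dfsA graph n t v with
      | ⟨(some d, v'), hp⟩ => ⟨(some (w + d), v'), hp⟩
      | ⟨(none, v'), hp⟩ =>
        let r2 := goA graph rest t v'
        ⟨r2.val, List.Subset.trans hp r2.prop⟩
termination_by (pvKeysLeft graph v, l.length, 0)
decreasing_by
  · exact Prod.Lex.right _ (Prod.Lex.left _ _ (by simp))
  · by_cases hk : n ∈ graph.map Prod.fst
    · exact Prod.Lex.left _ _ (pvKeysLeft_lt_add graph v n hk _hv)
    · rw [pvKeysLeft_add_not_key graph v n hk, pvGetD_nil_of_not_key graph n hk]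
      exact Prod.Lex.right _ (Prod.Lex.left _ _ (by simp))
  · rcases lt_or_eq_of_le (pvKeysLeft_mono graph v v' hp) with h | h
    · exact Prod.Lex.left _ _ h
    · rw [h]
      exact Prod.Lex.right _ (Prod.Lex.left _ _ (by simp))
end

def dfs (graph : List (Int × List (Int × Int))) (start : Int) (target : Int) (visited : List Int) : Option Int :=
  (dfsA graph start target visited).val.1

-- ===== PORT B =====
/-- port of B's `while stack:` loop; each frame is (edge weight into that node, remaining neighbors) -/
def loopB (graph : List (Int × List (Int × Int))) (t : Int) :
    List (Int × List (Int × Int)) → List Int → Option Int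
  | [], _ => none
  | (_, []) :: rest, v => loopB graph t rest v          -- iterator exhausted: stack.pop()
  | (w, (n, wn) :: l) :: rest, v =>
    if n ∈ v then loopB graph t ((w, l) :: rest) v      -- continue
    else if n = t then some ((((w, (n, wn) :: l) :: rest).map Prod.fst).sum + wn)
    else loopB graph t ((wn, (PySem.Dict.mk graph).getD n []) :: (w, l) :: rest) (PySem.Set.add v n)
termination_by stack v => (pvKeysLeft graph v, (stack.map (fun f => f.2.length)).sum, stack.length)
decreasing_by
  · simp only [List.map_cons, List.sum_cons, List.length_nil, List.length_cons, Nat.zero_add]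
    exact Prod.Lex.right _ (Prod.Lex.right _ (Nat.lt_succ_self _))
  · simp only [List.map_cons, List.sum_cons, List.length_cons]
    exact Prod.Lex.right _ (Prod.Lex.left _ _ (by omega))
  · rename_i hv _ht
    by_cases hk : n ∈ graph.map Prod.fst
    · exact Prod.Lex.left _ _ (pvKeysLeft_lt_add graph v n hk hv)
    · rw [pvKeysLeft_add_not_key graph v n hk, pvGetD_nil_of_not_key graph n hk]
      simp only [List.map_cons, List.sum_cons, List.length_cons, List.length_nil]
      exact Prod.Lex.right _ (Prod.Lex.left _ _ (by omega))

def dfs_alt (graph : List (Int × List (Int × Int))) (start : Int) (target : Int) (visited : List Int) : Option Int :=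
  if start = target then some 0
  else loopB graph target [(0, (PySem.Dict.mk graph).getD start [])] (PySem.Set.add visited start)

-- ===== PRECONDITION & SPEC =====
def Spec_dfs (graph : List (Int × List (Int × Int))) (start : Int) (target : Int) (visited : List Int) (out : Option Int) : Prop := out = dfs_alt graph start target visited
instance (graph : List (Int × List (Int × Int))) (start : Int) (target : Int) (visited : List Int) (out : Option Int) : Decidable (Spec_dfs graph start target visited out) := by unfold Spec_dfs; infer_instance

-- ===== CLAIM (what is proved, stated in full; the proofs are below) =====
def Claim_equal_dfs : Prop := ∀ (graph : List (Int × List (Int × Int))) (start : Int) (target : Int) (visited : List Int), Dom_dfs graph start target visited → Spec_dfs graph start target visited (dfs graph start target visited)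

-- ===== LEMMAS AND PROOFS =====
/-- A-side view of a B stack: run A's neighbour loop on the top frame; on failure resume the rest. -/
def resumeA (graph : List (Int × List (Int × Int))) (t : Int) :
    List (Int × List (Int × Int)) → List Int → Option Int
  | [], _ => none
  | (w, l) :: rest, v =>
    match (goA graph l t v).val with
    | (some d, _) => some ((((w, l) :: rest).map Prod.fst).sum + d)
    | (none, v') => resumeA graph t rest v'

theorem goA_nil_val (graph : List (Int × List (Int × Int))) (t : Int) (v : List Int) :
    (goA graph [] t v).val = (none, v) := by
  simp [goA]

theorem goA_cons_mem_val (graph : List (Int × List (Int × Int))) (n w : Int)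
    (rest : List (Int × Int)) (t : Int) (v : List Int) (h : n ∈ v) :
    (goA graph ((n, w) :: rest) t v).val = (goA graph rest t v).val := by
  rw [goA]
  simp [h]

theorem goA_cons_not_mem_val (graph : List (Int × List (Int × Int))) (n w : Int)
    (rest : List (Int × Int)) (t : Int) (v : List Int) (h : n ∉ v) :
    (goA graph ((n, w) :: rest) t v).val =
      match (dfsA graph n t v).val with
      | (some d, v') => (some (w + d), v')
      | (none, v') => (goA graph rest t v').val := by
  rw [goA]
  simp only [h, dite_false]
  rcases hA : dfsA graph n t v with ⟨⟨r, v'⟩, hp⟩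
  cases r
  · simp
  · simp

theorem dfsA_val (graph : List (Int × List (Int × Int))) (s t : Int) (v : List Int) :
    (dfsA graph s t v).val =
      if s = t then (some 0, v)
      else (goA graph ((PySem.Dict.mk graph).getD s []) t (PySem.Set.add v s)).val := by
  rw [dfsA]
  split <;> rfl

theorem loopB_eq_resumeA (graph : List (Int × List (Int × Int))) (t : Int)
    (stack : List (Int × List (Int × Int))) (v : List Int) :
    loopB graph t stack v = resumeA graph t stack v := by
  fun_induction loopB graph t stack v with
  | case1 => simp [resumeA]
  | case2 w rest v ih =>
    rw [ih, resumeA, goA_nil_val]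
  | case3 w n wn l rest v h ih =>
    rw [ih]
    simp only [resumeA, goA_cons_mem_val _ _ _ _ _ _ h, List.map_cons, List.sum_cons]
  | case4 w wn l rest v h =>
    simp only [resumeA, goA_cons_not_mem_val _ _ _ _ _ _ h, dfsA_val,
      List.map_cons, List.sum_cons]
    congr 1
    ring
  | case5 w n wn l rest v h1 h2 ih =>
    rw [ih]
    rcases hG : (goA graph ((PySem.Dict.mk graph).getD n []) t (PySem.Set.add v n)).val with ⟨r, v1⟩
    cases r with
    | some d =>
      simp only [resumeA, goA_cons_not_mem_val _ _ _ _ _ _ h1, dfsA_val, h2, if_false, hG,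
        List.map_cons, List.sum_cons]
      congr 1
      ring
    | none =>
      simp only [resumeA, goA_cons_not_mem_val _ _ _ _ _ _ h1, dfsA_val, h2, if_false, hG,
        List.map_cons, List.sum_cons]

-- ===== VERDICT (by name: the statement is the Claim_ definition above) =====
theorem dfs_spec : Claim_equal_dfs := by
  intro graph s t v _
  unfold Spec_dfs dfs dfs_alt
  rw [dfsA_val]
  by_cases hst : s = t
  · simp [hst]
  · simp only [hst, if_false]
    rw [loopB_eq_resumeA]
    unfold resumeA
    rcases hG : (goA graph ((PySem.Dict.mk graph).getD s []) t (PySem.Set.add v s)).val with ⟨r, v'⟩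
    cases r <;> simp [resumeA]
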